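-- pv_equiv track=rewrite | github.com/alexsfking/python_exercises | codewars/loneliest_character.py | loneliest
-- ===== SOURCE A (Python) =====
-- def loneliest(strng:str):
--     spaces_dict=dict()
--     count=0
--     last_c=None
--     for c in strng.strip():
--         if(c!=" "):
--             spaces_dict[c]=count
--             if(last_c):
--                 spaces_dict[last_c]+=count
--             last_c=c
--             count=0
--         else:
--             count+=1
--     maximum=max(spaces_dict.values())
--     return [key for key, value in spaces_dict.items() if value == maximum]
-- ===== SOURCE B (Python) =====
-- def loneliest(strng):
--     s = strng.strip()
--     occ = [(i, c) for i, c in enumerate(s) if c != " "]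
--     d = {}
--     if occ:
--         d[occ[0][1]] = 0
--     for (i, x), (j, y) in zip(occ, occ[1:]):
--         g = j - i - 1
--         d[y] = g
--         d[x] += g
--     m = max(d.values())
--     return [k for k, v in d.items() if v == m]
-- ===== Notes on version B (the rewrite author's own statement) =====
-- stated objective: alternative
-- what changed: B drops A's rolling space counter and last_c sentinel: it collects the non-space positions once and, for each consecutive pair, derives the gap of spaces from the index difference and credits it to both flanking characters (d[y]=g; d[x]+=g); Pre_ excludes inputs that strip to the empty string, where A's max() raises ValueError (B raises there too).
import Mathlib
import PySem

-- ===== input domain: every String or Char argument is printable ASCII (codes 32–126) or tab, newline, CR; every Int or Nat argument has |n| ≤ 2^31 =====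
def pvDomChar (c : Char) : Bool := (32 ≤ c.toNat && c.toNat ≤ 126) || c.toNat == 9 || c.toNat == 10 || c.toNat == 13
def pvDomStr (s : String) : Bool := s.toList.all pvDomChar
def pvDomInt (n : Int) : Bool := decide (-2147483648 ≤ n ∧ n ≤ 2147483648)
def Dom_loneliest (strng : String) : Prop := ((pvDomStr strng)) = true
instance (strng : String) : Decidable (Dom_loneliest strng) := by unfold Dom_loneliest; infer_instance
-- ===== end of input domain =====

-- B replaces A's rolling accumulator (space counter / last_c sentinel) by a pairwise pass:
-- it collects the non-space positions and credits each gap of spaces to the two characters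
-- flanking it; a different decomposition of the same O(n) work.

-- ===== PORT A =====
def aStep (st : PySem.Dict Char Int × Int × Option Char) (c : Char) :
    PySem.Dict Char Int × Int × Option Char :=
  if c ≠ ' ' then
    let d1 := st.1.insert c st.2.1
    let d2 := match st.2.2 with
      | some l => d1.modify l 0 (· + st.2.1)   -- spaces_dict[last_c] += count (last_c always present)
      | none => d1
    (d2, 0, some c)
  else
    (st.1, st.2.1 + 1, st.2.2)

def loneliest (strng : String) : List String :=
  let st := ((PySem.Str.strip strng).toList).foldl aStep (PySem.Dict.empty, 0, none)
  match PySem.List.max? st.1.values (fun v => v) with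
  | some m => (st.1.items.filter (fun kv => kv.2 == m)).map (fun kv => kv.1.toString)
  | none => []   -- Python: max() raises ValueError on the empty dict; excluded by Pre_loneliest

-- ===== PORT B =====
-- one gap of g spaces between occurrences p (left) and q (right): d[y] = g; d[x] += g
-- (the left char is always already a key of d, so '+=' never raises: modify with default 0 is exact)
def bEdge (d : PySem.Dict Char Int) (p : (Int × Char) × (Int × Char)) : PySem.Dict Char Int :=
  let g := p.2.1 - p.1.1 - 1
  (d.insert p.2.2 g).modify p.1.2 0 (· + g)

def loneliest_alt (strng : String) : List String :=
  let s := (PySem.Str.strip strng).toList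
  let occ := (PySem.List.enumerate s).filter (fun ic => ic.2 != ' ')
  let d0 : PySem.Dict Char Int := match occ with
    | [] => PySem.Dict.empty
    | ic :: _ => PySem.Dict.empty.insert ic.2 0
  let d := (occ.zip occ.tail).foldl bEdge d0
  match PySem.List.max? d.values (fun v => v) with
  | some m => (d.items.filter (fun kv => kv.2 == m)).map (fun kv => kv.1.toString)
  | none => []

-- ===== PRECONDITION & SPEC =====
-- Pre_ excludes exactly the inputs that strip to the empty string, where A's max() raises ValueError.
def Pre_loneliest (strng : String) : Prop := PySem.Str.strip strng ≠ ""
instance (strng : String) : Decidable (Pre_loneliest strng) := by unfold Pre_loneliest; infer_instance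
def pvWitness_loneliest : String := "b a  a"

def Spec_loneliest (strng : String) (out : List String) : Prop := out = loneliest_alt strng
instance (strng : String) (out : List String) : Decidable (Spec_loneliest strng out) := by unfold Spec_loneliest; infer_instance

-- ===== CLAIM (what is proved, stated in full; the proofs are below) =====
def Claim_equal_loneliest : Prop := ∀ (strng : String), Dom_loneliest strng → Pre_loneliest strng → Spec_loneliest strng (loneliest strng)

-- ===== LEMMAS AND PROOFS =====

-- spaces at the head of the suffix: the gap between an occurrence and the next one
def bAfter : List Char → Int
  | [] => 0
  | c :: t => if c = ' ' then bAfter t + 1 else 0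

-- the canonical form both folds reduce to: walk the chars carrying the pending space run and
-- the previous non-space char, inserting each non-space char's finished value at once
def gMain : PySem.Dict Char Int → Int → Option Char → List Char → PySem.Dict Char Int
  | d, _, _, [] => d
  | d, count, last, c :: t =>
    if c = ' ' then gMain d (count + 1) last t
    else gMain (d.insert c (if last = some c then count + bAfter t + count else count + bAfter t))
           0 (some c) t

-- B's fold over the zipped pairs, as a recursion carrying the previous occurrence
def bRun : PySem.Dict Char Int → (Int × Char) → List (Int × Char) → PySem.Dict Char Int
  | d, _, [] => d
  | d, p, q :: rest => bRun (bEdge d (p, q)) q rest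

-- the non-space occurrences of t, enumerated from i
def occOf (i : Int) (t : List Char) : List (Int × Char) :=
  (PySem.List.enumerate t i).filter (fun ic => ic.2 != ' ')

-- ---- dict algebra ----
theorem dict_modify_insert_self (d : PySem.Dict Char Int) (k : Char) (v d0 : Int) (f : Int → Int) :
    (d.insert k v).modify k d0 f = d.insert k (f v) := by
  unfold PySem.Dict.modify
  rw [PySem.Dict.getD_insert_self, PySem.Dict.insert_insert_self]

theorem dict_insert_modify_self (d : PySem.Dict Char Int) (k : Char) (d0 : Int) (f : Int → Int) (v : Int) :
    (d.modify k d0 f).insert k v = d.insert k v := by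
  unfold PySem.Dict.modify
  rw [PySem.Dict.insert_insert_self]

theorem dict_modify_ext (d : PySem.Dict Char Int) (k : Char) (d0 : Int) (f g : Int → Int)
    (h : ∀ v, f v = g v) : d.modify k d0 f = d.modify k d0 g := by
  unfold PySem.Dict.modify
  rw [h]

theorem dict_insert_insert_comm (d : PySem.Dict Char Int) (l c : Char) (w v : Int)
    (hne : l ≠ c) (hl : d.contains l = true) :
    (d.insert c v).insert l w = (d.insert l w).insert c v := by
  apply PySem.Dict.ext
  have hlc : ((d.insert c v).contains l) = true := by
    rw [PySem.Dict.contains_insert]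
    simp [hl]
  by_cases hc : d.contains c = true
  · have hcl : ((d.insert l w).contains c) = true := by
      rw [PySem.Dict.contains_insert]
      simp [hc]
    rw [PySem.Dict.items_insert_of_contains _ _ hlc, PySem.Dict.items_insert_of_contains _ _ hc,
        PySem.Dict.items_insert_of_contains _ _ hcl, PySem.Dict.items_insert_of_contains _ _ hl]
    rw [List.map_map, List.map_map]
    apply List.map_congr_left
    intro p _
    simp only [Function.comp]
    by_cases h1 : p.1 = c
    · simp [h1, Ne.symm hne]
    · by_cases h2 : p.1 = l
      · simp [h2, hne]
      · simp [h1, h2]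
  · have hc' : d.contains c = false := by simpa using hc
    have hcl : ((d.insert l w).contains c) = false := by
      rw [PySem.Dict.contains_insert]
      simp [hc', Ne.symm hne]
    rw [PySem.Dict.items_insert_of_contains _ _ hlc, PySem.Dict.items_insert_of_not_contains _ _ hc',
        PySem.Dict.items_insert_of_not_contains _ _ hcl, PySem.Dict.items_insert_of_contains _ _ hl]
    rw [List.map_append]
    simp [Ne.symm hne]

theorem dict_modify_insert_comm (d : PySem.Dict Char Int) (l c : Char) (v d0 : Int) (f : Int → Int)
    (hne : l ≠ c) (hl : d.contains l = true) :
    (d.insert c v).modify l d0 f = (d.modify l d0 f).insert c v := by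
  unfold PySem.Dict.modify
  rw [PySem.Dict.getD_insert_of_ne _ _ _ hne]
  exact dict_insert_insert_comm d l c (f (d.getD l d0)) v hne hl

theorem dict_modify_id (d : PySem.Dict Char Int) (k : Char) (d0 : Int) (f : Int → Int)
    (hk : d.contains k = true) (hnd : d.keys.Nodup) (hf : ∀ v, f v = v) :
    d.modify k d0 f = d := by
  unfold PySem.Dict.modify
  rw [hf]
  apply PySem.Dict.ext
  rw [PySem.Dict.items_insert_of_contains _ _ hk]
  have : ∀ p ∈ d.items, (if (p.1 == k) = true then (k, d.getD k d0) else p) = p := by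
    intro p hp
    obtain ⟨p1, p2⟩ := p
    by_cases h : p1 = k
    · subst h
      have hv := PySem.Dict.getD_of_mem_items d hp hnd d0
      simp [hv]
    · simp [h]
  rw [List.map_congr_left this]
  simp

theorem dict_nodup_modify (d : PySem.Dict Char Int) (k : Char) (d0 : Int) (f : Int → Int)
    (h : d.keys.Nodup) : (d.modify k d0 f).keys.Nodup := by
  unfold PySem.Dict.modify
  exact PySem.Dict.nodup_keys_insert _ _ _ h

theorem dict_contains_modify (d : PySem.Dict Char Int) (k k' : Char) (d0 : Int) (f : Int → Int)
    (h : d.contains k' = true) : (d.modify k d0 f).contains k' = true := by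
  unfold PySem.Dict.modify
  rw [PySem.Dict.contains_insert]
  simp [h]

-- ---- A's fold reduces to gMain ----
theorem gMain_congr_dict {d d' : PySem.Dict Char Int} {count : Int} {last : Option Char}
    {t : List Char} (h : d = d') : gMain d count last t = gMain d' count last t := by rw [h]

theorem a_fold_some : ∀ (t : List Char) (d : PySem.Dict Char Int) (l : Char) (count : Int),
    d.keys.Nodup → d.contains l = true → (t = [] → count = 0) → t.getLast? ≠ some ' ' →
    (t.foldl aStep (d, count, some l)).1
      = gMain (d.modify l 0 (· + (count + bAfter t))) count (some l) t := by
  intro t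
  induction t with
  | nil =>
    intro d l count hnd hl h0 _
    simp only [List.foldl_nil, gMain, bAfter]
    rw [h0 rfl]
    exact (dict_modify_id d l 0 _ hl hnd (by intro v; omega)).symm
  | cons c t' ih =>
    intro d l count hnd hl _ htrail
    by_cases hc : c = ' '
    · subst hc
      have ht' : t' ≠ [] := by
        intro h; subst h; simp [List.getLast?] at htrail
      have htrail' : t'.getLast? ≠ some ' ' := by
        cases t' with
        | nil => simp at ht'
        | cons a u => simpa [List.getLast?_cons_cons] using htrail
      have e1 : List.foldl aStep (d, count, some l) (' ' :: t')
          = List.foldl aStep (d, count + 1, some l) t' := by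
        simp [aStep]
      have e2 : gMain (d.modify l 0 (· + (count + bAfter (' ' :: t')))) count (some l) (' ' :: t')
          = gMain (d.modify l 0 (· + (count + bAfter (' ' :: t')))) (count + 1) (some l) t' := by
        simp [gMain]
      rw [e1, e2, ih d l (count + 1) hnd hl (fun h => absurd h ht') htrail']
      apply gMain_congr_dict
      apply dict_modify_ext
      intro v
      have hb : bAfter (' ' :: t') = bAfter t' + 1 := by simp [bAfter]
      rw [hb]
      omega
    · have htrail' : t'.getLast? ≠ some ' ' := by
        cases t' with
        | nil => simp
        | cons a u => simpa [List.getLast?_cons_cons] using htrail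
      have e1 : List.foldl aStep (d, count, some l) (c :: t')
          = List.foldl aStep ((d.insert c count).modify l 0 (· + count), 0, some c) t' := by
        simp [aStep, hc]
      rw [e1]
      by_cases hlc : l = c
      · subst hlc
        rw [ih ((d.insert l count).modify l 0 (· + count)) l 0
            (dict_nodup_modify _ _ _ _ (PySem.Dict.nodup_keys_insert _ _ _ hnd))
            (dict_contains_modify _ _ _ _ _ (PySem.Dict.contains_insert_self _ _ _))
            (fun _ => rfl) htrail']
        have e2 : gMain (d.modify l 0 (· + (count + bAfter (l :: t')))) count (some l) (l :: t')
            = gMain ((d.modify l 0 (· + (count + bAfter (l :: t')))).insert l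
                (count + bAfter t' + count)) 0 (some l) t' := by
          simp [gMain, hc]
        rw [e2]
        apply gMain_congr_dict
        rw [dict_modify_insert_self, dict_modify_insert_self, dict_insert_modify_self]
        congr 1
        omega
      · rw [ih ((d.insert c count).modify l 0 (· + count)) c 0
            (dict_nodup_modify _ _ _ _ (PySem.Dict.nodup_keys_insert _ _ _ hnd))
            (dict_contains_modify _ _ _ _ _ (PySem.Dict.contains_insert_self _ _ _))
            (fun _ => rfl) htrail']
        have e2 : gMain (d.modify l 0 (· + (count + bAfter (c :: t')))) count (some l) (c :: t')
            = gMain ((d.modify l 0 (· + (count + bAfter (c :: t')))).insert c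
                (count + bAfter t')) 0 (some c) t' := by
          simp [gMain, hc, hlc]
        rw [e2]
        apply gMain_congr_dict
        rw [dict_modify_insert_comm d l c count 0 (· + count) hlc hl, dict_modify_insert_self]
        have hb : bAfter (c :: t') = 0 := by simp [bAfter, hc]
        rw [hb]
        have e3 : (d.modify l 0 (· + count)) = (d.modify l 0 (· + (count + 0))) := by
          apply dict_modify_ext; intro v; omega
        rw [← e3]
        congr 1
        omega

-- ---- B's fold reduces to gMain ----
theorem occOf_cons (i : Int) (c : Char) (t : List Char) :
    occOf i (c :: t) = if c = ' ' then occOf (i + 1) t else (i, c) :: occOf (i + 1) t := by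
  unfold occOf
  rw [PySem.List.enumerate_cons]
  by_cases hc : c = ' '
  · simp [List.filter, hc]
  · have hbne : (c != ' ') = true := by simp [hc]
    simp [List.filter, hbne, hc]

theorem zip_tail_foldl : ∀ (rest : List (Int × Char)) (prev : Int × Char) (d : PySem.Dict Char Int),
    (((prev :: rest).zip rest).foldl bEdge d) = bRun d prev rest := by
  intro rest
  induction rest with
  | nil => intro prev d; rfl
  | cons q qs ih =>
    intro prev d
    show (((prev, q) :: (q :: qs).zip qs).foldl bEdge d) = bRun (bEdge d (prev, q)) q qs
    rw [List.foldl_cons]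
    exact ih q (bEdge d (prev, q))

theorem b_run_gMain : ∀ (t : List Char) (i p : Int) (x : Char) (d : PySem.Dict Char Int),
    d.keys.Nodup → d.contains x = true → (t = [] → i - p - 1 = 0) → t.getLast? ≠ some ' ' →
    bRun d (p, x) (occOf i t)
      = gMain (d.modify x 0 (· + ((i - p - 1) + bAfter t))) (i - p - 1) (some x) t := by
  intro t
  induction t with
  | nil =>
    intro i p x d hnd hx h0 _
    have hz : i - p - 1 = 0 := h0 rfl
    show d = gMain (d.modify x 0 (· + ((i - p - 1) + bAfter []))) (i - p - 1) (some x) []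
    simp only [gMain, bAfter]
    exact (dict_modify_id d x 0 _ hx hnd (by intro v; omega)).symm
  | cons c t' ih =>
    intro i p x d hnd hx _ htrail
    by_cases hc : c = ' '
    · subst hc
      have ht' : t' ≠ [] := by
        intro h; subst h; simp [List.getLast?] at htrail
      have htrail' : t'.getLast? ≠ some ' ' := by
        cases t' with
        | nil => simp at ht'
        | cons a u => simpa [List.getLast?_cons_cons] using htrail
      rw [occOf_cons, if_pos rfl]
      rw [ih (i + 1) p x d hnd hx (fun h => absurd h ht') htrail']
      have e2 : gMain (d.modify x 0 (· + ((i - p - 1) + bAfter (' ' :: t')))) (i - p - 1)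
            (some x) (' ' :: t')
          = gMain (d.modify x 0 (· + ((i - p - 1) + bAfter (' ' :: t')))) (i - p - 1 + 1)
            (some x) t' := by
        simp [gMain]
      rw [e2]
      have hcnt : i + 1 - p - 1 = i - p - 1 + 1 := by omega
      rw [hcnt]
      apply gMain_congr_dict
      apply dict_modify_ext
      intro v
      have hb : bAfter (' ' :: t') = bAfter t' + 1 := by simp [bAfter]
      rw [hb]
      omega
    · have htrail' : t'.getLast? ≠ some ' ' := by
        cases t' with
        | nil => simp
        | cons a u => simpa [List.getLast?_cons_cons] using htrail
      rw [occOf_cons, if_neg hc]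
      show bRun (bEdge d ((p, x), (i, c))) (i, c) (occOf (i + 1) t') = _
      have hbe : bEdge d ((p, x), (i, c)) = (d.insert c (i - p - 1)).modify x 0 (· + (i - p - 1)) := rfl
      rw [hbe]
      rw [ih (i + 1) i c ((d.insert c (i - p - 1)).modify x 0 (· + (i - p - 1)))
          (dict_nodup_modify _ _ _ _ (PySem.Dict.nodup_keys_insert _ _ _ hnd))
          (dict_contains_modify _ _ _ _ _ (PySem.Dict.contains_insert_self _ _ _))
          (fun _ => by omega) htrail']
      have hz : i + 1 - i - 1 = 0 := by omega
      rw [hz]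
      have e2 : gMain (d.modify x 0 (· + ((i - p - 1) + bAfter (c :: t')))) (i - p - 1)
            (some x) (c :: t')
          = gMain ((d.modify x 0 (· + ((i - p - 1) + bAfter (c :: t')))).insert c
              (if some x = some c then (i - p - 1) + bAfter t' + (i - p - 1)
               else (i - p - 1) + bAfter t')) 0 (some c) t' := by
        simp only [gMain, if_neg hc]
      rw [e2]
      apply gMain_congr_dict
      have hb : bAfter (c :: t') = 0 := by simp [bAfter, hc]
      rw [hb]
      by_cases hxc : x = c
      · subst hxc
        rw [dict_modify_insert_self, dict_modify_insert_self, dict_insert_modify_self,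
            if_pos rfl]
        congr 1
        omega
      · rw [dict_modify_insert_comm d x c (i - p - 1) 0 (· + (i - p - 1)) hxc hx,
            dict_modify_insert_self]
        simp only [if_neg (fun h => hxc (Option.some.inj h))]
        have e3 : (d.modify x 0 (· + (i - p - 1)))
            = (d.modify x 0 (· + ((i - p - 1) + 0))) := by
          apply dict_modify_ext; intro v; omega
        rw [← e3]
        congr 1
        omega

-- ---- the stripped string neither starts nor ends with a space ----
theorem dropWhile_head_not_space : ∀ (l : List Char),
    (List.dropWhile PySem.Chars.isspace l).head? ≠ some ' ' := by
  intro l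
  induction l with
  | nil => simp
  | cons c t ih =>
    by_cases h : PySem.Chars.isspace c = true
    · simpa [List.dropWhile, h] using ih
    · simp only [List.dropWhile, h]
      intro hcontra
      simp at hcontra
      subst hcontra
      exact h (by decide)

theorem strip_no_trailing_space (l : List Char) :
    (PySem.Chars.strip l).getLast? ≠ some ' ' := by
  unfold PySem.Chars.strip PySem.Chars.rstrip
  rw [List.getLast?_reverse]
  exact dropWhile_head_not_space _

theorem strip_head_not_space (l : List Char) :
    (PySem.Chars.strip l).head? ≠ some ' ' := by
  have hmhead : (PySem.Chars.lstrip l).head? ≠ some ' ' := by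
    unfold PySem.Chars.lstrip
    exact dropWhile_head_not_space l
  unfold PySem.Chars.strip PySem.Chars.rstrip
  obtain ⟨t, ht⟩ :=
    List.dropWhile_suffix (l := (PySem.Chars.lstrip l).reverse) (p := PySem.Chars.isspace)
  have hm : PySem.Chars.lstrip l
      = (List.dropWhile PySem.Chars.isspace (PySem.Chars.lstrip l).reverse).reverse ++ t.reverse := by
    have := congrArg List.reverse ht
    simpa [List.reverse_append] using this.symm
  cases hrev : (List.dropWhile PySem.Chars.isspace (PySem.Chars.lstrip l).reverse).reverse with
  | nil => simp
  | cons a u =>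
    intro hcontra
    have ha : a = ' ' := by simpa using hcontra
    apply hmhead
    rw [hm, hrev, ha]
    rfl

-- the two ports build the same dict
theorem dicts_equal (s : List Char) (hhead : s.head? ≠ some ' ') (htrail : s.getLast? ≠ some ' ') :
    (s.foldl aStep (PySem.Dict.empty, 0, none)).1
      = ((occOf 0 s).zip (occOf 0 s).tail).foldl bEdge
          (match occOf 0 s with
           | [] => PySem.Dict.empty
           | ic :: _ => PySem.Dict.empty.insert ic.2 0) := by
  cases s with
  | nil => rfl
  | cons c t =>
    have hc : c ≠ ' ' := by
      intro h; subst h; exact hhead rfl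
    have htrail' : t.getLast? ≠ some ' ' := by
      cases t with
      | nil => simp
      | cons a u => simpa [List.getLast?_cons_cons] using htrail
    have hocc : occOf 0 (c :: t) = (0, c) :: occOf 1 t := by
      rw [occOf_cons, if_neg hc]
      norm_num
    -- A side
    have eA : List.foldl aStep (PySem.Dict.empty, 0, none) (c :: t)
        = List.foldl aStep (PySem.Dict.empty.insert c 0, 0, some c) t := by
      simp [aStep, hc]
    have hA : ((c :: t).foldl aStep (PySem.Dict.empty, 0, none)).1
        = gMain (PySem.Dict.empty.insert c (0 + (0 + bAfter t))) 0 (some c) t := by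
      rw [eA, a_fold_some t (PySem.Dict.empty.insert c 0) c 0
          (PySem.Dict.nodup_keys_insert _ _ _ PySem.Dict.nodup_keys_empty)
          (PySem.Dict.contains_insert_self _ _ _) (fun _ => rfl) htrail']
      apply gMain_congr_dict
      rw [dict_modify_insert_self]
    -- B side
    have hB : (((0, c) :: occOf 1 t).zip ((0, c) :: occOf 1 t).tail).foldl bEdge
          (PySem.Dict.empty.insert c 0)
        = gMain (PySem.Dict.empty.insert c (0 + (0 + bAfter t))) 0 (some c) t := by
      rw [List.tail_cons,
          zip_tail_foldl (occOf 1 t) (0, c) (PySem.Dict.empty.insert c 0),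
          b_run_gMain t 1 0 c (PySem.Dict.empty.insert c 0)
            (PySem.Dict.nodup_keys_insert _ _ _ PySem.Dict.nodup_keys_empty)
            (PySem.Dict.contains_insert_self _ _ _) (fun _ => by omega) htrail']
      have hz : (1 : Int) - 0 - 1 = 0 := by omega
      rw [hz]
      apply gMain_congr_dict
      rw [dict_modify_insert_self]
    rw [hocc]
    exact hA.trans hB.symm

-- ===== VERDICT (by name: the statement is the Claim_ definition above) =====
theorem loneliest_spec : Claim_equal_loneliest := by
  unfold Claim_equal_loneliest
  intro strng _ _
  simp only [Spec_loneliest, loneliest, loneliest_alt]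
  have hhead : ((PySem.Str.strip strng).toList).head? ≠ some ' ' := by
    rw [PySem.Str.toList_strip]
    exact strip_head_not_space _
  have htrail : ((PySem.Str.strip strng).toList).getLast? ≠ some ' ' := by
    rw [PySem.Str.toList_strip]
    exact strip_no_trailing_space _
  have hocc : ((PySem.List.enumerate ((PySem.Str.strip strng).toList) 0).filter
      (fun ic => ic.2 != ' ')) = occOf 0 ((PySem.Str.strip strng).toList) := rfl
  rw [hocc, ← dicts_equal ((PySem.Str.strip strng).toList) hhead htrail]
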